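-- pv_equiv track=rewrite | github.com/LoganWelsh/Crossword-Search | Crossword Search - Backend.py | find_word_horizontal
-- ===== SOURCE A (Python) =====
-- def find_word_horizontal (crosswords, word):
--     if not crosswords or not word:
--         return None
--     for index, row in enumerate(crosswords):
--         temp_str = ''.join(row)
--         if temp_str.find(word) >= 0:
--             return [index, temp_str.find(word)]
--     return None
-- ===== SOURCE B (Python) =====
-- def find_word_horizontal(crosswords, word):
--     if not crosswords or not word:
--         return None
--     m = len(word)
--     B, P = 257, 1000000007
--     hw = 0
--     for ch in word:
--         hw = (hw * B + ord(ch)) % P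
--     powm = pow(B, m - 1, P)
--     for index, row in enumerate(crosswords):
--         s = ''.join(row)
--         n = len(s)
--         if n < m:
--             continue
--         h = 0
--         for ch in s[:m]:
--             h = (h * B + ord(ch)) % P
--         for start in range(n - m + 1):
--             if h == hw and s[start:start + m] == word:
--                 return [index, start]
--             if start + m < n:
--                 h = ((h - ord(s[start]) * powm) * B + ord(s[start + m])) % P
--     return None
-- ===== Notes on version B (the rewrite author's own statement) =====
-- stated objective: alternative
-- what changed: Replaces str.find per row with a Rabin-Karp rolling-hash search: a hash of the word is precomputed, each row's windows are hashed incrementally, and only hash-equal windows are compared, verified on match so the result is exact.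
import Mathlib
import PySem

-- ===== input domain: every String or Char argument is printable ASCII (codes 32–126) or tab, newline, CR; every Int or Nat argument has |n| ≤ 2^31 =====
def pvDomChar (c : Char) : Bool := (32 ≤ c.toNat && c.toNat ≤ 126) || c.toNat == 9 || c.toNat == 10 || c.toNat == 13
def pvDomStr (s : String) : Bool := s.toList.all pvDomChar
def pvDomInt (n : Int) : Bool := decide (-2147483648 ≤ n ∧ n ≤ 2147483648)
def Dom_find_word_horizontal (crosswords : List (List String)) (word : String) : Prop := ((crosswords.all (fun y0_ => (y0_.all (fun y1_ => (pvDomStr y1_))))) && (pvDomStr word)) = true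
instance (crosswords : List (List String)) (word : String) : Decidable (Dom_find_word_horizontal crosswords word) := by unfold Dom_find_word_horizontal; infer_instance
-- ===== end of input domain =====

-- B replaces str.find per row with a Rabin–Karp rolling-hash search (hash the word once,
-- hash each row's windows incrementally, verify hash-equal windows); exact, same results.
-- ===== PORT A =====
def findA_go (word : String) : Nat → List (List String) → Option (List Int)
  | _, [] => none
  | i, row :: rest =>
    if PySem.Str.find (PySem.Str.join "" row) word ≥ 0 then
      some [(i : Int), PySem.Str.find (PySem.Str.join "" row) word]
    else
      findA_go word (i + 1) rest

def find_word_horizontal (crosswords : List (List String)) (word : String) : Option (List Int) :=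
  if crosswords = [] ∨ word = "" then none
  else findA_go word 0 crosswords

-- ===== PORT B =====
def rkP : Int := 1000000007
def rkB : Int := 257

-- hw / initial row hash: the python loop 'h = (h * B + ord(ch)) % P' over a char list
def rkHash (l : List Char) : Int :=
  l.foldl (fun h c => PySem.Int.mod (h * rkB + (c.toNat : Int)) rkP) 0

-- pow(B, m-1, P), ported as the modular power it computes
def rkPow (m : Nat) : Int := PySem.Int.mod (rkB ^ (m - 1)) rkP

-- the inner 'for start in range(n-m+1)' loop with rolling hash state h; k = remaining starts
def rkLoop (cs w : List Char) (hw powm : Int) : Nat → Nat → Int → Option Nat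
  | 0, _, _ => none
  | k + 1, start, h =>
    if h = hw ∧ (cs.drop start).take w.length = w then some start
    else
      rkLoop cs w hw powm k (start + 1)
        (if start + w.length < cs.length then
          PySem.Int.mod ((h - ((cs.getD start ' ').toNat : Int) * powm) * rkB
            + ((cs.getD (start + w.length) ' ').toNat : Int)) rkP
        else h)

-- one row: skip if shorter than the word ('continue'), else hash s[:m] and roll
def rkRow (cs w : List Char) (hw powm : Int) : Option Nat :=
  if cs.length < w.length then none
  else rkLoop cs w hw powm (cs.length - w.length + 1) 0 (rkHash (cs.take w.length))

def findB_go (w : List Char) (hw powm : Int) : Nat → List (List String) → Option (List Int)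
  | _, [] => none
  | i, row :: rest =>
    match rkRow (PySem.Str.join "" row).toList w hw powm with
    | some s => some [(i : Int), (s : Int)]
    | none => findB_go w hw powm (i + 1) rest

def find_word_horizontal_alt (crosswords : List (List String)) (word : String) : Option (List Int) :=
  if crosswords = [] ∨ word = "" then none
  else findB_go word.toList (rkHash word.toList) (rkPow word.toList.length) 0 crosswords

-- ===== PRECONDITION & SPEC =====
def Spec_find_word_horizontal (crosswords : List (List String)) (word : String) (out : Option (List Int)) : Prop := out = find_word_horizontal_alt crosswords word
instance (crosswords : List (List String)) (word : String) (out : Option (List Int)) : Decidable (Spec_find_word_horizontal crosswords word out) := by unfold Spec_find_word_horizontal; infer_instance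

-- ===== CLAIM (what is proved, stated in full; the proofs are below) =====
def Claim_equal_find_word_horizontal : Prop := ∀ (crosswords : List (List String)) (word : String), Dom_find_word_horizontal crosswords word → Spec_find_word_horizontal crosswords word (find_word_horizontal crosswords word)

-- ===== LEMMAS AND PROOFS =====

-- the polynomial value the rolling hash tracks (mod rkP)
def rkVal : List Char → Int
  | [] => 0
  | c :: t => (c.toNat : Int) * rkB ^ t.length + rkVal t

lemma rkP_pos : (0 : Int) < rkP := by norm_num [rkP]

lemma rkMod_eq (a : Int) : PySem.Int.mod a rkP = a % rkP :=
  PySem.Int.mod_eq_emod_of_pos rkP_pos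

lemma rkMod_modeq (a : Int) : PySem.Int.mod a rkP ≡ a [ZMOD rkP] := by
  rw [rkMod_eq]; exact Int.emod_emod_of_dvd a dvd_rfl

lemma rkFold_bounds (l : List Char) (a : Int) (ha : 0 ≤ a ∧ a < rkP) :
    0 ≤ l.foldl (fun h c => PySem.Int.mod (h * rkB + (c.toNat : Int)) rkP) a ∧
    l.foldl (fun h c => PySem.Int.mod (h * rkB + (c.toNat : Int)) rkP) a < rkP := by
  induction l generalizing a with
  | nil => exact ha
  | cons c t ih =>
    exact ih _ ⟨PySem.Int.mod_nonneg _ rkP_pos, PySem.Int.mod_lt _ rkP_pos⟩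

lemma rkHash_bounds (l : List Char) : 0 ≤ rkHash l ∧ rkHash l < rkP :=
  rkFold_bounds l 0 ⟨le_refl 0, rkP_pos⟩

lemma rkFold_modeq (l : List Char) (a : Int) :
    l.foldl (fun h c => PySem.Int.mod (h * rkB + (c.toNat : Int)) rkP) a
      ≡ a * rkB ^ l.length + rkVal l [ZMOD rkP] := by
  induction l generalizing a with
  | nil => simp [rkVal]
  | cons c t ih =>
    have h1 := ih (PySem.Int.mod (a * rkB + (c.toNat : Int)) rkP)
    have h2 : PySem.Int.mod (a * rkB + (c.toNat : Int)) rkP * rkB ^ t.length + rkVal t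
        ≡ (a * rkB + (c.toNat : Int)) * rkB ^ t.length + rkVal t [ZMOD rkP] :=
      ((rkMod_modeq _).mul_right _).add_right _
    have h3 := h1.trans h2
    simp only [List.foldl_cons, List.length_cons, rkVal]
    refine h3.trans ?_
    have : (a * rkB + (c.toNat : Int)) * rkB ^ t.length + rkVal t
        = a * rkB ^ (t.length + 1) + ((c.toNat : Int) * rkB ^ t.length + rkVal t) := by ring
    rw [this]

lemma rkHash_eq_val (l : List Char) : rkHash l = rkVal l % rkP := by
  have h := rkFold_modeq l 0
  simp only [zero_mul, zero_add] at h
  have hb := rkHash_bounds l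
  have : rkHash l % rkP = rkVal l % rkP := h
  rw [← this, Int.emod_eq_of_lt hb.1 hb.2]

lemma rkVal_append (l : List Char) (d : Char) :
    rkVal (l ++ [d]) = rkVal l * rkB + (d.toNat : Int) := by
  induction l with
  | nil => simp [rkVal]
  | cons c t ih =>
    simp only [List.cons_append, rkVal, List.length_append, List.length_cons,
      List.length_nil, ih]
    ring

lemma rk_eq_of_modeq {x y : Int} (hx : 0 ≤ x ∧ x < rkP) (hy : 0 ≤ y ∧ y < rkP)
    (h : x ≡ y [ZMOD rkP]) : x = y := by
  have := h
  unfold Int.ModEq at this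
  rwa [Int.emod_eq_of_lt hx.1 hx.2, Int.emod_eq_of_lt hy.1 hy.2] at this

-- the rolling update is exact: it turns the hash of window s into the hash of window s+1
lemma rkRoll (cs w : List Char) (s : Nat) (hm : 1 ≤ w.length)
    (hlt : s + w.length < cs.length) :
    PySem.Int.mod ((rkHash ((cs.drop s).take w.length)
        - ((cs.getD s ' ').toNat : Int) * rkPow w.length) * rkB
      + ((cs.getD (s + w.length) ' ').toNat : Int)) rkP
    = rkHash ((cs.drop (s + 1)).take w.length) := by
  set m := w.length with hmdef
  have hs : s < cs.length := by omega
  set c : Char := cs.getD s ' ' with hc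
  set d : Char := cs.getD (s + m) ' ' with hd
  set t : List Char := (cs.drop (s + 1)).take (m - 1) with ht
  have htlen : t.length = m - 1 := by
    simp only [ht, List.length_take, List.length_drop]
    omega
  have hw1 : (cs.drop s).take m = c :: t := by
    rw [List.drop_eq_getElem_cons hs]
    rw [show m = (m - 1) + 1 by omega, List.take_succ_cons]
    congr 1
    rw [hc, List.getD_eq_getElem cs ' ' hs]
  have hw2 : (cs.drop (s + 1)).take m = t ++ [d] := by
    rw [show m = (m - 1) + 1 by omega, List.take_add_one, ← ht]
    congr 1
    have hlen : m - 1 < (cs.drop (s + 1)).length := by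
      simp only [List.length_drop]; omega
    rw [List.getElem?_eq_getElem hlen]
    simp only [List.getElem_drop]
    rw [hd, List.getD_eq_getElem cs ' ' (by omega : s + m < cs.length)]
    simp only [Option.toList_some]
    congr 2
    omega
  rw [hw1, hw2]
  apply rk_eq_of_modeq
  · exact ⟨PySem.Int.mod_nonneg _ rkP_pos, PySem.Int.mod_lt _ rkP_pos⟩
  · exact rkHash_bounds _
  · calc PySem.Int.mod ((rkHash (c :: t) - (c.toNat : Int) * rkPow m) * rkB + (d.toNat : Int)) rkP
        ≡ (rkHash (c :: t) - (c.toNat : Int) * rkPow m) * rkB + (d.toNat : Int) [ZMOD rkP] :=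
          rkMod_modeq _
      _ ≡ (rkVal (c :: t) - (c.toNat : Int) * rkB ^ (m - 1)) * rkB + (d.toNat : Int) [ZMOD rkP] := by
          apply Int.ModEq.add_right
          apply Int.ModEq.mul_right
          apply Int.ModEq.sub
          · rw [rkHash_eq_val]; exact Int.emod_emod_of_dvd _ dvd_rfl
          · exact Int.ModEq.mul_left _ (by rw [rkPow]; exact rkMod_modeq _)
      _ ≡ rkVal (t ++ [d]) [ZMOD rkP] := by
          have : (rkVal (c :: t) - (c.toNat : Int) * rkB ^ (m - 1)) * rkB + (d.toNat : Int)
              = rkVal (t ++ [d]) := by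
            rw [rkVal_append]
            simp only [rkVal, htlen]
            ring
          rw [this]
      _ ≡ rkHash (t ++ [d]) [ZMOD rkP] := by
          rw [rkHash_eq_val]
          exact (Int.emod_emod_of_dvd _ dvd_rfl).symm

-- with the invariant 'h = hash of the current window', the Rabin–Karp loop finds exactly
-- the first start whose window equals the word (a true match forces the hash test to pass)
lemma rkLoop_eq_find (cs w : List Char) (hm : 1 ≤ w.length) :
    ∀ (k start : Nat) (h : Int), start + k + w.length = cs.length + 1 →
    h = rkHash ((cs.drop start).take w.length) →
    rkLoop cs w (rkHash w) (rkPow w.length) k start h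
      = (List.range' start k).find? (fun s => (cs.drop s).take w.length == w) := by
  intro k
  induction k with
  | zero => intro start h _ _; rfl
  | succ k ih =>
    intro start h hcnt hinv
    rw [List.range'_succ, List.find?_cons]
    by_cases hsl : (cs.drop start).take w.length = w
    · rw [rkLoop, if_pos ⟨by rw [hinv, hsl], hsl⟩]
      simp [hsl]
    · rw [rkLoop, if_neg (by intro hh; exact hsl hh.2)]
      rw [show ((cs.drop start).take w.length == w) = false by simp [hsl]]
      cases k with
      | zero => rfl
      | succ k' =>
        have hlt : start + w.length < cs.length := by omega
        rw [if_pos hlt]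
        exact ih (start + 1) _ (by omega) (by rw [hinv, rkRoll cs w start hm hlt])

lemma rkRow_eq (cs w : List Char) (hm : 1 ≤ w.length) :
    rkRow cs w (rkHash w) (rkPow w.length)
      = (List.range (cs.length + 1 - w.length)).find? (fun s => (cs.drop s).take w.length == w) := by
  unfold rkRow
  by_cases hlen : cs.length < w.length
  · rw [if_pos hlen, show cs.length + 1 - w.length = 0 by omega]
    rfl
  · rw [if_neg hlen]
    rw [rkLoop_eq_find cs w hm (cs.length - w.length + 1) 0 _ (by omega) (by rw [List.drop_zero])]
    rw [show cs.length + 1 - w.length = cs.length - w.length + 1 by omega, List.range_eq_range']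

lemma range_find?_eq_some {p : Nat → Bool} {k f : Nat} (hf : f < k) (hp : p f = true)
    (hmin : ∀ i, i < f → p i = false) : (List.range k).find? p = some f := by
  induction k with
  | zero => omega
  | succ n ih =>
    rw [List.range_succ, List.find?_append]
    rcases Nat.lt_or_ge f n with h | h
    · rw [ih h]; rfl
    · have hfn : f = n := by omega
      have hnone : (List.range n).find? p = none := by
        rw [List.find?_eq_none]
        intro x hx
        simp only [List.mem_range] at hx
        simp [hmin x (by omega)]
      rw [hnone]
      simp only [Option.none_or, List.find?_cons, hfn ▸ hp]
      exact congrArg some hfn.symm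

lemma range_find?_eq_none {p : Nat → Bool} {k : Nat} (h : ∀ i, i < k → p i = false) :
    (List.range k).find? p = none := by
  rw [List.find?_eq_none]
  intro x hx
  simp only [List.mem_range] at hx
  simp [h x hx]

lemma take_eq_iff_prefix (cs w : List Char) (s : Nat) :
    (((cs.drop s).take w.length == w) = true) ↔ w <+: cs.drop s := by
  rw [beq_iff_eq, List.prefix_iff_eq_take]
  exact eq_comm

-- the first window equal to the word sits exactly where str.find points
lemma row_eq (cs w : List Char) :
    (List.range (cs.length + 1 - w.length)).find? (fun s => (cs.drop s).take w.length == w)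
      = if PySem.Chars.find cs w ≥ 0 then some (PySem.Chars.find cs w).toNat else none := by
  by_cases h : PySem.Chars.find cs w ≥ 0
  · have hs := PySem.Chars.find_spec (s := cs) (sub := w) h
    obtain ⟨hpre, hmin⟩ := hs
    rw [if_pos h]
    apply range_find?_eq_some
    · have h1 : w.length ≤ (cs.drop (PySem.Chars.find cs w).toNat).length := hpre.length_le
      have h2 := PySem.Chars.find_le_length cs w
      simp only [List.length_drop] at h1
      omega
    · exact (take_eq_iff_prefix cs w _).mpr hpre
    · intro i hi
      rw [← Bool.not_eq_true, take_eq_iff_prefix]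
      exact hmin i hi
  · rw [if_neg h]
    have hne : PySem.Chars.find cs w = -1 := by
      have := PySem.Chars.neg_one_le_find cs w
      omega
    have hninf : ¬ w <:+: cs := (PySem.Chars.find_eq_neg_one_iff cs w).mp hne
    apply range_find?_eq_none
    intro i _
    rw [← Bool.not_eq_true, take_eq_iff_prefix]
    intro hpre
    exact hninf (by
      have : PySem.Chars.isIn w cs = true :=
        (PySem.Chars.exists_prefix_drop_iff_isIn (s := cs) (sub := w)).mp ⟨i, hpre⟩
      exact (PySem.Chars.isIn_iff_infix w cs).mp this)

lemma go_eq (word : String) (hw : word ≠ "") (i : Nat) (l : List (List String)) :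
    findA_go word i l = findB_go word.toList (rkHash word.toList) (rkPow word.toList.length) i l := by
  have hm : 1 ≤ word.toList.length := by
    have hnil : word.toList ≠ [] := by
      intro h
      apply hw
      have h2 := congrArg String.ofList h
      rwa [String.ofList_toList] at h2
    have := List.length_pos_of_ne_nil hnil
    omega
  induction l generalizing i with
  | nil => rfl
  | cons row rest ih =>
    have hrow : rkRow (PySem.Str.join "" row).toList word.toList
        (rkHash word.toList) (rkPow word.toList.length)
        = if PySem.Chars.find (PySem.Str.join "" row).toList word.toList ≥ 0
          then some (PySem.Chars.find (PySem.Str.join "" row).toList word.toList).toNat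
          else none := by
      rw [rkRow_eq _ _ hm, row_eq]
    have hf : PySem.Str.find (PySem.Str.join "" row) word =
        PySem.Chars.find (PySem.Str.join "" row).toList word.toList := by
      simp [PySem.Str.find_eq]
    show (if PySem.Str.find (PySem.Str.join "" row) word ≥ 0 then _ else _) = _
    rw [show findB_go word.toList (rkHash word.toList) (rkPow word.toList.length) i (row :: rest) =
        match rkRow (PySem.Str.join "" row).toList word.toList
            (rkHash word.toList) (rkPow word.toList.length) with
        | some s => some [(i : Int), (s : Int)]
        | none => findB_go word.toList (rkHash word.toList) (rkPow word.toList.length) (i + 1) rest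
        from rfl, hrow]
    by_cases h : PySem.Chars.find (PySem.Str.join "" row).toList word.toList ≥ 0
    · have h2 : PySem.Str.find (PySem.Str.join "" row) word ≥ 0 := by rw [hf]; exact h
      rw [if_pos h, if_pos h2, hf]
      have h3 : PySem.Chars.find (PySem.Chars.join [] (List.map String.toList row)) word.toList ≥ 0 := by
        simpa using h
      simp [Int.toNat_of_nonneg h3]
    · have h2 : ¬ PySem.Str.find (PySem.Str.join "" row) word ≥ 0 := by rw [hf]; exact h
      rw [if_neg h, if_neg h2]
      exact ih (i + 1)

-- ===== VERDICT (by name: the statement is the Claim_ definition above) =====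
theorem find_word_horizontal_spec : Claim_equal_find_word_horizontal := by
  intro cw w _
  unfold Spec_find_word_horizontal find_word_horizontal find_word_horizontal_alt
  split
  · rfl
  · rename_i h
    rw [not_or] at h
    exact go_eq w h.2 0 cw
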